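-- pv_equiv track=rewrite | github.com/gkrait/excel2ics_translation | excel2ics.py | get_day_start_column
-- ===== SOURCE A (Python) =====
-- DAY_START_COLUMNS = [8, 14, 20, 26, 32, 38]  # H, N, T, Z, AF, AL
--
-- def get_day_start_column(col: int) -> int:
--     """Get the day start column for a given column.
--
--     Each day spans 6 columns. Returns the first column of that day.
--     """
--     for i, day_start in enumerate(DAY_START_COLUMNS):
--         day_end = day_start + 6
--         if day_start <= col < day_end:
--             return day_start
--     # If beyond known days, estimate
--     if col >= 38:
--         return 38 + ((col - 38) // 6) * 6
--     return 8
-- ===== SOURCE B (Python) =====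
-- def get_day_start_column(col: int) -> int:
--     """Get the day start column for a given column (closed form).
--
--     Each day spans 6 columns starting at 8. Columns before 8 map to 8.
--     """
--     if col < 8:
--         return 8
--     return 8 + ((col - 8) // 6) * 6
-- ===== Notes on version B (the rewrite author's own statement) =====
-- stated objective: simpler
-- what changed: Replaced the loop over DAY_START_COLUMNS plus the >=38 fallback by a single floor-division closed form with a col<8 guard.
import Mathlib
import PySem

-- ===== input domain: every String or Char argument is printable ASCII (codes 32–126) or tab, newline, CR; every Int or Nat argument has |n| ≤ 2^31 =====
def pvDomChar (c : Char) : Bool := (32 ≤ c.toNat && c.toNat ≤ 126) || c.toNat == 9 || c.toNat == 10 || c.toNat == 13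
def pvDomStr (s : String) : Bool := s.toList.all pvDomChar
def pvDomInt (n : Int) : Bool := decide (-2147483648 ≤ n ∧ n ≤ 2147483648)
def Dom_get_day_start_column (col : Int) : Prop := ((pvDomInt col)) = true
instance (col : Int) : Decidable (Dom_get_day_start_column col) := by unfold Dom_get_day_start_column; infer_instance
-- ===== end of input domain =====

-- B replaces A's scan of the constant table (plus >=38 fallback) by one floor-division closed form; objective: simpler.

-- ===== PORT A =====
def DAY_START_COLUMNS : List Int := [8, 14, 20, 26, 32, 38]

-- the for-loop with early return: first day_start whose block contains col
def pvLoopA (col : Int) : List Int → Option Int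
  | [] => none
  | day_start :: rest =>
      let day_end := day_start + 6
      if day_start ≤ col ∧ col < day_end then some day_start
      else pvLoopA col rest

def get_day_start_column (col : Int) : Int :=
  match pvLoopA col DAY_START_COLUMNS with
  | some d => d
  | none => if col ≥ 38 then 38 + ((col - 38).fdiv 6) * 6 else 8

-- ===== PORT B =====
def get_day_start_column_alt (col : Int) : Int :=
  if col < 8 then 8 else 8 + ((col - 8).fdiv 6) * 6

-- ===== PRECONDITION & SPEC =====
def Spec_get_day_start_column (col : Int) (out : Int) : Prop := out = get_day_start_column_alt col
instance (col : Int) (out : Int) : Decidable (Spec_get_day_start_column col out) := by unfold Spec_get_day_start_column; infer_instance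

-- ===== CLAIM (what is proved, stated in full; the proofs are below) =====
def Claim_equal_get_day_start_column : Prop := ∀ (col : Int), Dom_get_day_start_column col → Spec_get_day_start_column col (get_day_start_column col)

-- ===== LEMMAS AND PROOFS =====

theorem pvFdiv6_eq (a : Int) : a.fdiv 6 = a / 6 := by
  rw [Int.fdiv_eq_ediv]; norm_num

-- ===== VERDICT (by name: the statement is the Claim_ definition above) =====
theorem get_day_start_column_spec : Claim_equal_get_day_start_column := by
  intro col _
  unfold Spec_get_day_start_column get_day_start_column get_day_start_column_alt
  simp only [pvLoopA, DAY_START_COLUMNS, pvFdiv6_eq]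
  split_ifs <;> simp <;> omega
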